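-- pv_equiv track=rewrite | github.com/Douglas-Nyberg/supply_chain_lstm_intermittent | experiment_workflows/exp1_per_item_store_models/2_train_classical_models.py | sanitize_for_path
-- ===== SOURCE A (Python) =====
-- def sanitize_for_path(text: str) -> str:
--     """
--     Sanitize a string to be safe for use in file paths.
--
--     Args:
--         text: String to sanitize
--
--     Returns:
--         Sanitized string safe for file paths
--     """
--     # replace problematic chars with underscores
--     replacements = {
--         '/': '_',
--         '\\': '_',
--         ':': '_',
--         '*': '_',
--         '?': '_',
--         '"': '_',
--         '<': '_',
--         '>': '_',
--         '|': '_',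
--         ' ': '_'
--     }
--
--     sanitized = text
--     for char, replacement in replacements.items():
--         sanitized = sanitized.replace(char, replacement)
--
--     return sanitized
-- ===== SOURCE B (Python) =====
-- _BAD = set('/\\:*?"<>| ')
--
-- def sanitize_for_path(text: str) -> str:
--     # single character-wise pass instead of ten full-string replace() scans
--     return ''.join('_' if c in _BAD else c for c in text)
-- ===== Notes on version B (the rewrite author's own statement) =====
-- stated objective: simpler
-- what changed: A loops over a 10-entry replacement dict doing ten full-string .replace() passes; B does a single character-wise pass over the input consulting a set of unsafe characters; the results coincide since every target maps to the same underscore and underscore is never itself a target, so replacement order is irrelevant.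
import Mathlib
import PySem

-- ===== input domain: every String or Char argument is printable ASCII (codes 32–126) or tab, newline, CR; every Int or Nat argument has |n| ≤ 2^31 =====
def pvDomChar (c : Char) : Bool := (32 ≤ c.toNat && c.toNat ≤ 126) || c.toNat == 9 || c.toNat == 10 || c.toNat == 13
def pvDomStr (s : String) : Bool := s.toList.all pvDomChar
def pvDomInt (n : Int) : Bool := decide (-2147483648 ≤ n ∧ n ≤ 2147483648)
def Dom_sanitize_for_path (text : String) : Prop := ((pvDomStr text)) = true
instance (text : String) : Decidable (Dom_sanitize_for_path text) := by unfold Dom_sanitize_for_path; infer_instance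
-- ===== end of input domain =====

-- B replaces A's ten full-string .replace passes (a loop over a replacement dict) with one
-- character-wise pass consulting a set of the unsafe characters; objective: simpler.

-- ===== PORT A =====
-- the replacement dict, in insertion order
def pvReplacements : List (String × String) :=
  [("/", "_"), ("\\", "_"), (":", "_"), ("*", "_"), ("?", "_"),
   ("\"", "_"), ("<", "_"), (">", "_"), ("|", "_"), (" ", "_")]

def sanitize_for_path (text : String) : String :=
  pvReplacements.foldl (fun sanitized p => PySem.Str.replace sanitized p.1 p.2) text

-- ===== PORT B =====
-- the set of unsafe characters
def pvBad : List Char := ['/', '\\', ':', '*', '?', '"', '<', '>', '|', ' ']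

def sanitize_for_path_alt (text : String) : String :=
  String.ofList (text.toList.map (fun c => if pvBad.contains c then '_' else c))

-- ===== PRECONDITION & SPEC =====
def Spec_sanitize_for_path (text : String) (out : String) : Prop := out = sanitize_for_path_alt text
instance (text : String) (out : String) : Decidable (Spec_sanitize_for_path text out) := by unfold Spec_sanitize_for_path; infer_instance

-- ===== CLAIM (what is proved, stated in full; the proofs are below) =====
def Claim_equal_sanitize_for_path : Prop := ∀ (text : String), Dom_sanitize_for_path text → Spec_sanitize_for_path text (sanitize_for_path text)

-- ===== LEMMAS AND PROOFS =====

-- one single-char-to-underscore replacement step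
def pvStep (o c : Char) : Char := if c = o then '_' else c

-- replace.go with a single-char pattern is a map, given enough fuel
theorem pv_go_spec (o : Char) : ∀ (fuel : Nat) (l acc : List Char), l.length ≤ fuel →
    PySem.Chars.replace.go [o] ['_'] fuel l acc = acc.reverse ++ l.map (pvStep o) := by
  intro fuel
  induction fuel with
  | zero =>
    intro l acc h
    have : l = [] := List.eq_nil_of_length_eq_zero (Nat.le_zero.mp h)
    subst this
    simp [PySem.Chars.replace.go]
  | succ fuel ih =>
    intro l acc h
    cases l with
    | nil => simp [PySem.Chars.replace.go]
    | cons c t =>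
      simp only [PySem.Chars.replace.go]
      by_cases hc : c = o
      · subst hc
        have hp : List.isPrefixOf [c] (c :: t) = true := by simp [List.isPrefixOf]
        rw [if_pos hp]
        rw [ih _ _ (by simpa using Nat.le_of_succ_le_succ h)]
        simp [pvStep]
      · have hp : List.isPrefixOf [o] (c :: t) = false := by
          simp [List.isPrefixOf]
          intro h'; exact absurd h'.symm hc
        rw [if_neg (by simp [hp])]
        rw [ih _ _ (by simpa using Nat.le_of_succ_le_succ h)]
        simp [pvStep, hc]

-- single-character-to-underscore replace is a map over the characters
theorem pv_replace_single (l : List Char) (o : Char) :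
    PySem.Chars.replace l [o] ['_'] = l.map (pvStep o) := by
  simp only [PySem.Chars.replace, List.isEmpty]
  rw [pv_go_spec o l.length l [] (le_refl _)]
  simp

-- the composite of the ten single-char steps agrees pointwise with B's membership test
theorem pv_pointwise (c : Char) :
    pvStep ' ' (pvStep '|' (pvStep '>' (pvStep '<' (pvStep '"' (pvStep '?' (pvStep '*' (pvStep ':' (pvStep '\\' (pvStep '/' c)))))))))
      = (if pvBad.contains c then '_' else c) := by
  by_cases h : c ∈ pvBad
  · simp only [pvBad, List.mem_cons, List.not_mem_nil, or_false] at h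
    rcases h with rfl|rfl|rfl|rfl|rfl|rfl|rfl|rfl|rfl|rfl <;> decide
  · have hc : pvBad.contains c = false := by simpa using h
    simp only [pvBad, List.mem_cons, List.not_mem_nil, or_false] at h
    push_neg at h
    obtain ⟨n1, n2, n3, n4, n5, n6, n7, n8, n9, n10⟩ := h
    simp only [pvStep]
    rw [if_neg n1, if_neg n2, if_neg n3, if_neg n4, if_neg n5, if_neg n6, if_neg n7,
      if_neg n8, if_neg n9, if_neg n10, hc]
    simp

-- the ten map passes collapse into B's single membership map
theorem pv_chain (l : List Char) :
    ((((((((((l.map (pvStep '/')).map (pvStep '\\')).map (pvStep ':')).map (pvStep '*')).map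
      (pvStep '?')).map (pvStep '"')).map (pvStep '<')).map (pvStep '>')).map
      (pvStep '|')).map (pvStep ' '))
      = l.map (fun c => if pvBad.contains c then '_' else c) := by
  induction l with
  | nil => rfl
  | cons c t ih =>
    simp only [List.map_cons]
    rw [pv_pointwise c, ih]

-- ===== VERDICT (by name: the statement is the Claim_ definition above) =====
theorem sanitize_for_path_spec : Claim_equal_sanitize_for_path := by
  intro text _
  unfold Spec_sanitize_for_path sanitize_for_path sanitize_for_path_alt pvReplacements
  rw [← String.toList_inj]
  simp only [List.foldl_cons, List.foldl_nil, PySem.Str.toList_replace,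
    show ("/" : String).toList = ['/'] from rfl,
    show ("\\" : String).toList = ['\\'] from rfl,
    show (":" : String).toList = [':'] from rfl,
    show ("*" : String).toList = ['*'] from rfl,
    show ("?" : String).toList = ['?'] from rfl,
    show ("\"" : String).toList = ['"'] from rfl,
    show ("<" : String).toList = ['<'] from rfl,
    show (">" : String).toList = ['>'] from rfl,
    show ("|" : String).toList = ['|'] from rfl,
    show (" " : String).toList = [' '] from rfl,
    show ("_" : String).toList = ['_'] from rfl,
    pv_replace_single, String.toList_ofList]
  exact pv_chain text.toList
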